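-- pv_equiv track=rewrite | github.com/ekek54/BaekJoon_Python | 백준/Gold/16971. 배열 B의 값/배열 B의 값.py | arr_val
-- ===== SOURCE A (Python) =====
-- def arr_val(line_vals):
--   n = len(line_vals)
--   result = 0
--   for i in range(n):
--     if i == 0 or i == n - 1:
--       result += line_vals[i]
--     else:
--       result += (line_vals[i] * 2)
--   return result
-- ===== SOURCE B (Python) =====
-- def arr_val(line_vals):
--   return sum(line_vals) + sum(line_vals[1:-1])
-- ===== Notes on version B (the rewrite author's own statement) =====
-- stated objective: simpler
-- what changed: Replaces the index loop with its per-element endpoint/interior branch by two aggregate sums: every element counted once plus the interior slice line_vals[1:-1] counted once more (C-level sum instead of a Python-level branching loop).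
import Mathlib
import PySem

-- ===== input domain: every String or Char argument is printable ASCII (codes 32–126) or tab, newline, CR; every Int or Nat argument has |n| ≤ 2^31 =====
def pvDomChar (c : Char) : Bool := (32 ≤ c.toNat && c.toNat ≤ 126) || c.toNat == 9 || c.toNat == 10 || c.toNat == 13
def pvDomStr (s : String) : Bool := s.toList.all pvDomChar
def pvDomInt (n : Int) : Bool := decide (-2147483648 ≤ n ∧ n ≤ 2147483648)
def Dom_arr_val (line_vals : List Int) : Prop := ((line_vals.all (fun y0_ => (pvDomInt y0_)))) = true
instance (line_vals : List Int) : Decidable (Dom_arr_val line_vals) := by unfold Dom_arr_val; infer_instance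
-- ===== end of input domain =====

-- B replaces A's branching index loop by two aggregate sums: every element once, plus the interior slice line_vals[1:-1] once more; objective: simpler.

-- ===== PORT A =====
-- literal port of A; every index i drawn from range(n) is in range, so pyGetD is exact here
def arr_val (line_vals : List Int) : Int :=
  let n : Int := line_vals.length
  (PySem.List.pyRange 0 n 1).foldl
    (fun result i =>
      if i = 0 ∨ i = n - 1 then result + PySem.List.pyGetD line_vals i 0
      else result + PySem.List.pyGetD line_vals i 0 * 2) 0


-- ===== PORT B =====
def arr_val_alt (line_vals : List Int) : Int :=
  line_vals.sum + (PySem.List.slice line_vals (some 1) (some (-1))).sum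


-- ===== PRECONDITION & SPEC =====
def Spec_arr_val (line_vals : List Int) (out : Int) : Prop := out = arr_val_alt line_vals
instance (line_vals : List Int) (out : Int) : Decidable (Spec_arr_val line_vals out) := by unfold Spec_arr_val; infer_instance

-- ===== CLAIM (what is proved, stated in full; the proofs are below) =====
def Claim_equal_arr_val : Prop := ∀ (line_vals : List Int), Dom_arr_val line_vals → Spec_arr_val line_vals (arr_val line_vals)

-- ===== LEMMAS AND PROOFS =====

theorem slice_one_neg_one (xs : List Int) :
    PySem.List.slice xs (some 1) (some (-1)) = xs.tail.dropLast := by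
  cases xs with
  | nil => rfl
  | cons a t =>
    simp [PySem.List.slice, PySem.List.clampIdx, List.dropLast_eq_take]
    rw [if_neg (by omega : ¬((t.length : Int) < 0))]
    omega


theorem sum_getD_range (ys : List Int) :
    ((List.range ys.length).map (fun k => ys.getD k 0 * 2)).sum = 2 * ys.sum := by
  induction ys with
  | nil => simp
  | cons y t ih =>
    rw [List.length_cons, List.range_succ_eq_map]
    simp only [List.map_cons, List.map_map, List.sum_cons]
    have h : (List.map ((fun k => (y :: t).getD k 0 * 2) ∘ Nat.succ) (List.range t.length))
        = List.map (fun k => t.getD k 0 * 2) (List.range t.length) := by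
      apply List.map_congr_left; intro k _; rfl
    rw [h, ih]
    simp; ring


theorem foldl_branch (xs : List Int) (n : Int) (l : List Int) (init : Int) :
    l.foldl (fun result i =>
      if i = 0 ∨ i = n - 1 then result + PySem.List.pyGetD xs i 0
      else result + PySem.List.pyGetD xs i 0 * 2) init
    = init + (l.map (fun i =>
        if i = 0 ∨ i = n - 1 then PySem.List.pyGetD xs i 0
        else PySem.List.pyGetD xs i 0 * 2)).sum := by
  have h : (fun (result i : Int) =>
      if i = 0 ∨ i = n - 1 then result + PySem.List.pyGetD xs i 0
      else result + PySem.List.pyGetD xs i 0 * 2)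
      = (fun result i => result +
          (if i = 0 ∨ i = n - 1 then PySem.List.pyGetD xs i 0
           else PySem.List.pyGetD xs i 0 * 2)) := by
    funext r i; split <;> rfl
  rw [h, PySem.List.foldl_add]


theorem arr_core (xs : List Int) :
    List.foldl (fun result i =>
      if i = 0 ∨ i = (xs.length : Int) - 1 then result + PySem.List.pyGetD xs i 0
      else result + PySem.List.pyGetD xs i 0 * 2) 0
      (PySem.List.pyRange 0 (xs.length : Int) 1)
    = xs.sum + xs.tail.dropLast.sum := by
  match xs with
  | [] => rfl
  | [a] =>
    simp [PySem.List.pyRange_one, PySem.List.pyGetD_zero]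
  | a :: c :: t =>
    obtain ⟨ys, b, hyb⟩ : ∃ ys b, c :: t = ys ++ [b] :=
      ⟨(c :: t).dropLast, (c :: t).getLast (by simp),
        (List.dropLast_append_getLast (by simp)).symm⟩
    rw [hyb]
    set xs' := a :: (ys ++ [b]) with hxs
    set n : Int := (xs'.length : Int) with hn
    have hnv : n = (ys.length : Int) + 2 := by
      simp only [hn, hxs, List.length_cons, List.length_append, List.length_nil]
      push_cast; ring
    rw [foldl_branch]
    have hsplit : PySem.List.pyRange 0 n 1
        = PySem.List.pyRange 0 1 1 ++ (PySem.List.pyRange 1 (n-1) 1 ++ PySem.List.pyRange (n-1) n 1) := by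
      rw [← PySem.List.pyRange_one_append 1 (n-1) n (by omega) (by omega),
          ← PySem.List.pyRange_one_append 0 1 n (by omega) (by omega)]
    have h01 : PySem.List.pyRange 0 1 1 = [0] := by decide
    have hlast : PySem.List.pyRange (n-1) n 1 = [n-1] := by
      have h := PySem.List.pyRange_one_singleton (n-1)
      rw [show n - 1 + 1 = n by ring] at h
      exact h
    rw [hsplit, h01, hlast]
    simp only [List.map_append, List.sum_append, List.map_cons, List.map_nil, List.sum_cons,
      List.sum_nil]
    have hg0 : PySem.List.pyGetD xs' 0 0 = a := by
      simp [PySem.List.pyGetD_zero, hxs]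
    have hgl : PySem.List.pyGetD xs' (n-1) 0 = b := by
      have h : n - 1 = ((ys.length + 1 : Nat) : Int) := by rw [hnv]; push_cast; ring
      rw [h, PySem.List.pyGetD_natCast]
      simp [hxs]
    have hmid : (PySem.List.pyRange 1 (n-1) 1).map
        (fun i => if i = 0 ∨ i = n - 1 then PySem.List.pyGetD xs' i 0
                  else PySem.List.pyGetD xs' i 0 * 2)
        = (List.range ys.length).map (fun k => ys.getD k 0 * 2) := by
      rw [PySem.List.pyRange_one 1 (n-1)]
      have hl : (n - 1 - 1).toNat = ys.length := by omega
      rw [hl, List.map_map]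
      apply List.map_congr_left
      intro k hk
      rw [List.mem_range] at hk
      simp only [Function.comp]
      have hne0 : (1 : Int) + k ≠ 0 := by omega
      have hnel : (1 : Int) + k ≠ n - 1 := by omega
      rw [if_neg (not_or.mpr ⟨hne0, hnel⟩)]
      have : (1 : Int) + k = ((k + 1 : Nat) : Int) := by push_cast; ring
      rw [this, PySem.List.pyGetD_natCast]
      simp only [hxs, List.getD, List.getElem?_cons_succ]
      rw [List.getElem?_append_left hk]
    rw [hmid, sum_getD_range]
    simp only [true_or, or_true, if_true]
    rw [hg0, hgl]
    simp [hxs]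
    ring


theorem arr_val_eq_alt (xs : List Int) : arr_val xs = arr_val_alt xs := by
  unfold arr_val arr_val_alt
  rw [slice_one_neg_one]
  exact arr_core xs

-- ===== VERDICT (by name: the statement is the Claim_ definition above) =====
theorem arr_val_spec : Claim_equal_arr_val := by
  intro line_vals _
  unfold Spec_arr_val
  exact arr_val_eq_alt line_vals
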